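-- pv_equiv track=rewrite | github.com/codevbv/Information-retreival-CS60092 | 20CS60R57_A1/ASSIGNMENT1_20CS60R57_2.py | get_speaker
-- ===== SOURCE A (Python) =====
-- def get_speaker(text,last_index,my_participants):
-- 	i = last_index+1
-- 	qa = "Question-and-Answer Session"
-- 	my_dict = {}
--
-- 	while(i<len(text) and text[i].find(qa)==-1):
-- 		if text[i].strip() in my_participants:
-- 			curr_participant = text[i].strip()
-- 			i += 1
-- 			string = ""
-- 			while(i<len(text) and (text[i].strip() not in my_participants) and text[i].find(qa)==-1):
-- 				string = string+text[i]
-- 				i += 1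
-- 			my_dict[curr_participant] = string
-- 		else:
-- 			i +=1
--
-- 	return i,my_dict
-- ===== SOURCE B (Python) =====
-- def get_speaker(text, last_index, my_participants):
--     i = last_index + 1
--     qa = "Question-and-Answer Session"
--     my_dict = {}
--     curr = None
--     buf = ""
--     while i < len(text) and text[i].find(qa) == -1:
--         line = text[i]
--         if line.strip() in my_participants:
--             if curr is not None:
--                 my_dict[curr] = buf
--             curr = line.strip()
--             buf = ""
--         elif curr is not None:
--             buf += line
--         i += 1
--     if curr is not None:
--         my_dict[curr] = buf
--     return i, my_dict
-- ===== Notes on version B (the rewrite author's own statement) =====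
-- stated objective: simpler
-- what changed: Replaces A's two nested while-loops sharing the index with one flat pass that carries the current speaker and a string buffer, flushing the buffer into the dict when a new speaker or the end/Q&A marker is reached.
import Mathlib
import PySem

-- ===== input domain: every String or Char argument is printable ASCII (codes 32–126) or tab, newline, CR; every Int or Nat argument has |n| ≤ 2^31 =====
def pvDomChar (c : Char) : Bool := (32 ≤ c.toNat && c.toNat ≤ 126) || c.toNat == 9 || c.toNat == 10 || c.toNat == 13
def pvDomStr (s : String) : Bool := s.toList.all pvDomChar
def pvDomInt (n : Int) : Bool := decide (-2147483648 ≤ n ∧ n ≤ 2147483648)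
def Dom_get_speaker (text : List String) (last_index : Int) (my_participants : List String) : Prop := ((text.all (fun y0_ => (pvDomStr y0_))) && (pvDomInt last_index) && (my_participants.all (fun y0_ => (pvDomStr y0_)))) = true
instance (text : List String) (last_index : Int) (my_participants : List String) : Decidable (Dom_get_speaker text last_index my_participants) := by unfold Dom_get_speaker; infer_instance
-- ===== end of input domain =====

-- B replaces A's two nested while-loops sharing the index with a single flat pass that
-- carries the current speaker and a string buffer (objective: simpler, same O(total text) cost).
-- Each while-loop is ported structurally on a fuel = number of indices left below len(text)
-- at its entry; the index strictly increases every iteration, so the fuel is sufficient.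

def pvQA : String := "Question-and-Answer Session"

-- ===== PORT A =====
-- inner while: 'while i<len(text) and text[i].strip() not in my_participants and text[i].find(qa)==-1'
-- (text[i] ported as pyGetD … ""; Pre_ keeps every executed access in range, A raises outside it)
def gsInner (text : List String) (my_participants : List String) :
    Nat → Int → String → Int × String
  | 0, i, s => (i, s)
  | f + 1, i, s =>
    if i < (text.length : Int) ∧
        PySem.Str.strip (PySem.List.pyGetD text i "") ∉ my_participants ∧
        PySem.Str.find (PySem.List.pyGetD text i "") pvQA = -1 then
      gsInner text my_participants f (i + 1) (s ++ PySem.List.pyGetD text i "")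
    else (i, s)

-- outer while of A; fuel decreases once per outer iteration (the index strictly increases)
def gsOuter (text : List String) (my_participants : List String) :
    Nat → Int → PySem.Dict String String → Int × PySem.Dict String String
  | 0, i, d => (i, d)
  | f + 1, i, d =>
    if i < (text.length : Int) ∧ PySem.Str.find (PySem.List.pyGetD text i "") pvQA = -1 then
      if PySem.Str.strip (PySem.List.pyGetD text i "") ∈ my_participants then
        let c := PySem.Str.strip (PySem.List.pyGetD text i "")
        let p := gsInner text my_participants ((text.length : Int) - (i + 1)).toNat (i + 1) ""
        gsOuter text my_participants f p.1 (d.insert c p.2)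
      else gsOuter text my_participants f (i + 1) d
    else (i, d)

def get_speaker (text : List String) (last_index : Int) (my_participants : List String) :
    Int × (List (String × String)) :=
  let r := gsOuter text my_participants ((text.length : Int) - (last_index + 1)).toNat
    (last_index + 1) PySem.Dict.empty
  (r.1, r.2.items)

-- ===== PORT B =====
-- 'if curr is not None: my_dict[curr] = buf' — the flush of the pending speaker
def gsFlush (curr : Option (String × String)) (d : PySem.Dict String String) :
    PySem.Dict String String :=
  match curr with
  | none => d
  | some (c, s) => d.insert c s

-- B's single while-loop: state = (current speaker with its buffer | none)
def gsFlat (text : List String) (my_participants : List String) :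
    Nat → Int → Option (String × String) → PySem.Dict String String →
    Int × PySem.Dict String String
  | 0, i, curr, d => (i, gsFlush curr d)
  | f + 1, i, curr, d =>
    if i < (text.length : Int) ∧ PySem.Str.find (PySem.List.pyGetD text i "") pvQA = -1 then
      let line := PySem.List.pyGetD text i ""
      if PySem.Str.strip line ∈ my_participants then
        gsFlat text my_participants f (i + 1) (some (PySem.Str.strip line, "")) (gsFlush curr d)
      else
        match curr with
        | some (c, s) => gsFlat text my_participants f (i + 1) (some (c, s ++ line)) d
        | none => gsFlat text my_participants f (i + 1) none d
    else (i, gsFlush curr d)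

def get_speaker_alt (text : List String) (last_index : Int) (my_participants : List String) :
    Int × (List (String × String)) :=
  let r := gsFlat text my_participants ((text.length : Int) - (last_index + 1)).toNat
    (last_index + 1) none PySem.Dict.empty
  (r.1, r.2.items)

-- ===== PRECONDITION & SPEC =====
-- Pre_ excludes exactly the inputs where the Python A raises IndexError (the first indexed
-- position last_index+1 below -len(text)); B raises there too.
def Pre_get_speaker (text : List String) (last_index : Int) (my_participants : List String) : Prop :=
  -(text.length : Int) ≤ last_index + 1
instance (text : List String) (last_index : Int) (my_participants : List String) : Decidable (Pre_get_speaker text last_index my_participants) := by unfold Pre_get_speaker; infer_instance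

def pvWitness_get_speaker : List String × Int × List String := (["A", "hi"], -1, ["A"])

def Spec_get_speaker (text : List String) (last_index : Int) (my_participants : List String) (out : Int × (List (String × String))) : Prop := out = get_speaker_alt text last_index my_participants
instance (text : List String) (last_index : Int) (my_participants : List String) (out : Int × (List (String × String))) : Decidable (Spec_get_speaker text last_index my_participants out) := by unfold Spec_get_speaker; infer_instance

-- ===== CLAIM (what is proved, stated in full; the proofs are below) =====
def Claim_equal_get_speaker : Prop := ∀ (text : List String) (last_index : Int) (my_participants : List String), Dom_get_speaker text last_index my_participants → Pre_get_speaker text last_index my_participants → Spec_get_speaker text last_index my_participants (get_speaker text last_index my_participants)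

-- ===== LEMMAS AND PROOFS =====

-- A's inner loop stops at once when its condition fails, with any fuel.
lemma gsInner_stop (text my_participants : List String) (f : Nat) (i : Int) (s : String)
    (hc : ¬(i < (text.length : Int) ∧
        PySem.Str.strip (PySem.List.pyGetD text i "") ∉ my_participants ∧
        PySem.Str.find (PySem.List.pyGetD text i "") pvQA = -1)) :
    gsInner text my_participants f i s = (i, s) := by
  cases f with
  | zero => rfl
  | succ f => rw [gsInner, if_neg hc]

-- A's outer loop stops at once when its condition fails, with any fuel.
lemma gsOuter_stop (text my_participants : List String) (f : Nat) (i : Int)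
    (d : PySem.Dict String String)
    (hg : ¬(i < (text.length : Int) ∧
        PySem.Str.find (PySem.List.pyGetD text i "") pvQA = -1)) :
    gsOuter text my_participants f i d = (i, d) := by
  cases f with
  | zero => rfl
  | succ f => rw [gsOuter, if_neg hg]

-- B's loop stops (and flushes) at once when the shared condition fails, with any fuel.
lemma gsFlat_stop (text my_participants : List String) (f : Nat) (i : Int)
    (curr : Option (String × String)) (d : PySem.Dict String String)
    (hg : ¬(i < (text.length : Int) ∧
        PySem.Str.find (PySem.List.pyGetD text i "") pvQA = -1)) :
    gsFlat text my_participants f i curr d = (i, gsFlush curr d) := by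
  cases f with
  | zero => rfl
  | succ f => rw [gsFlat, if_neg hg]

-- B's loop with a pending speaker (c, s) = A's inner loop from i on s, then A's outer loop
-- resumed after inserting the collected speech; f, g are sufficient fuels for each side.
lemma gsFlat_some (text my_participants : List String) :
    ∀ (f : Nat) (g : Nat) (i : Int) (c s : String) (d : PySem.Dict String String),
      ((text.length : Int) - i).toNat ≤ f → ((text.length : Int) - i).toNat ≤ g →
      gsFlat text my_participants f i (some (c, s)) d =
        (let p := gsInner text my_participants ((text.length : Int) - i).toNat i s;
         gsOuter text my_participants g p.1 (d.insert c p.2)) := by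
  intro f
  induction f with
  | zero =>
    intro g i c s d hf hg
    have hi : (text.length : Int) ≤ i := by omega
    have hc : ¬(i < (text.length : Int) ∧
        PySem.Str.strip (PySem.List.pyGetD text i "") ∉ my_participants ∧
        PySem.Str.find (PySem.List.pyGetD text i "") pvQA = -1) := fun h => absurd h.1 (by omega)
    have hgd : ¬(i < (text.length : Int) ∧
        PySem.Str.find (PySem.List.pyGetD text i "") pvQA = -1) := fun h => absurd h.1 (by omega)
    simp only [gsFlat, gsInner_stop text my_participants _ i s hc,
      gsOuter_stop text my_participants g i _ hgd, gsFlush]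
  | succ f ih =>
    intro g i c s d hf hg
    by_cases hguard : i < (text.length : Int) ∧
        PySem.Str.find (PySem.List.pyGetD text i "") pvQA = -1
    · obtain ⟨g', rfl⟩ : ∃ g', g = g' + 1 := ⟨g - 1, by omega⟩
      by_cases hp : PySem.Str.strip (PySem.List.pyGetD text i "") ∈ my_participants
      · -- participant line: both stop the collection here and flush / insert
        have hc : ¬(i < (text.length : Int) ∧
            PySem.Str.strip (PySem.List.pyGetD text i "") ∉ my_participants ∧
            PySem.Str.find (PySem.List.pyGetD text i "") pvQA = -1) := fun h => h.2.1 hp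
        rw [gsFlat, if_pos hguard, if_pos hp]
        rw [ih g' (i + 1) _ "" _ (by omega) (by omega)]
        simp only [gsInner_stop text my_participants _ i s hc]
        conv_rhs => rw [gsOuter, if_pos hguard, if_pos hp]
        simp [gsFlush]
      · -- ordinary line: appended to the buffer / collected by the inner loop
        have hc : i < (text.length : Int) ∧
            PySem.Str.strip (PySem.List.pyGetD text i "") ∉ my_participants ∧
            PySem.Str.find (PySem.List.pyGetD text i "") pvQA = -1 := ⟨hguard.1, hp, hguard.2⟩
        have hnat : ((text.length : Int) - i).toNat =
            ((text.length : Int) - (i + 1)).toNat + 1 := by omega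
        rw [gsFlat, if_pos hguard, if_neg hp]
        rw [hnat]
        conv_rhs => rw [gsInner, if_pos hc]
        exact ih (g' + 1) (i + 1) c _ d (by omega) (by omega)
    · -- end of text or Q&A line: flush = A's insert after the inner loop
      have hc : ¬(i < (text.length : Int) ∧
          PySem.Str.strip (PySem.List.pyGetD text i "") ∉ my_participants ∧
          PySem.Str.find (PySem.List.pyGetD text i "") pvQA = -1) := fun h => hguard ⟨h.1, h.2.2⟩
      simp only [gsFlat_stop text my_participants _ i _ d hguard,
        gsInner_stop text my_participants _ i s hc,
        gsOuter_stop text my_participants g i _ hguard, gsFlush]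

-- B's loop with no pending speaker = A's outer loop.
lemma gsFlat_none (text my_participants : List String) :
    ∀ (f : Nat) (g : Nat) (i : Int) (d : PySem.Dict String String),
      ((text.length : Int) - i).toNat ≤ f → ((text.length : Int) - i).toNat ≤ g →
      gsFlat text my_participants f i none d = gsOuter text my_participants g i d := by
  intro f
  induction f with
  | zero =>
    intro g i d hf hg
    have hgd : ¬(i < (text.length : Int) ∧
        PySem.Str.find (PySem.List.pyGetD text i "") pvQA = -1) := fun h => absurd h.1 (by omega)
    rw [gsFlat, gsOuter_stop text my_participants g i d hgd, gsFlush]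
  | succ f ih =>
    intro g i d hf hg
    by_cases hguard : i < (text.length : Int) ∧
        PySem.Str.find (PySem.List.pyGetD text i "") pvQA = -1
    · obtain ⟨g', rfl⟩ : ∃ g', g = g' + 1 := ⟨g - 1, by omega⟩
      by_cases hp : PySem.Str.strip (PySem.List.pyGetD text i "") ∈ my_participants
      · rw [gsFlat, if_pos hguard, if_pos hp]
        rw [gsFlat_some text my_participants f g' (i + 1) _ "" _ (by omega) (by omega)]
        conv_rhs => rw [gsOuter, if_pos hguard, if_pos hp]
        simp [gsFlush]
      · rw [gsFlat, if_pos hguard, if_neg hp]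
        show gsFlat text my_participants f (i + 1) none d = _
        rw [ih g' (i + 1) d (by omega) (by omega)]
        conv_rhs => rw [gsOuter, if_pos hguard, if_neg hp]
    · rw [gsFlat_stop text my_participants _ i _ d hguard,
        gsOuter_stop text my_participants g i d hguard, gsFlush]

-- ===== VERDICT (by name: the statement is the Claim_ definition above) =====
theorem get_speaker_spec : Claim_equal_get_speaker := by
  intro text last_index my_participants _ _
  unfold Spec_get_speaker get_speaker get_speaker_alt
  rw [gsFlat_none text my_participants _ _ (last_index + 1) PySem.Dict.empty (le_refl _) (le_refl _)]
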